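-- pv_equiv track=rewrite | github.com/FAIZANTKHAN/DSA_Python | DSA31_Pair Sum XOR of an Array.py | pair_sum_xor_bitwise
-- ===== SOURCE A (Python) =====
-- def pair_sum_xor_bitwise(arr):
--     n = len(arr)
--     result = 0
--
--     # Calculate the total sum of all elements in the array
--     total_sum = sum(arr)
--
--     # Iterate through each element to compute the result
--     for value in arr:
--         # Calculate the remaining sum after excluding the current element
--         remaining_sum = total_sum - value
--         # Update the result with XOR of remaining_sum + current element
--         result ^= (remaining_sum + value)
--
--     return result
-- ===== SOURCE B (Python) =====
-- def pair_sum_xor_bitwise(arr):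
--     # Every loop iteration of A XORs the same value sum(arr) into the result,
--     # so the answer is sum(arr) when len(arr) is odd and 0 when it is even.
--     return sum(arr) if len(arr) % 2 == 1 else 0
-- ===== Notes on version B (the rewrite author's own statement) =====
-- stated objective: faster
-- what changed: Replaced the per-element XOR loop by the closed form: each iteration XORs the same value sum(arr) into the accumulator, so the result is sum(arr) for odd-length input and 0 for even-length input.
import Mathlib
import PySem

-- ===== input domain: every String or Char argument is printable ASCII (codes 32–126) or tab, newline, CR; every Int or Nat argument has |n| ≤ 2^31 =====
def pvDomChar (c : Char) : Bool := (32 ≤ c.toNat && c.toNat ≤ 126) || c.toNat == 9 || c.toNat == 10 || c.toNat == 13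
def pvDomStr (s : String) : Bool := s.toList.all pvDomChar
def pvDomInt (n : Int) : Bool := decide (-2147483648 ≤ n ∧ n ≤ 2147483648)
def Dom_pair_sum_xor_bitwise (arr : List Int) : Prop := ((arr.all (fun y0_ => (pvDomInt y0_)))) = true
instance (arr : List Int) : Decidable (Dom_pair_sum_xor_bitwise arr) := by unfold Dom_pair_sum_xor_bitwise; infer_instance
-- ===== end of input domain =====

-- B replaces A's XOR loop by the closed form (sum for odd length, 0 for even); same return value, fewer passes.


-- ===== PORT A =====
-- Literal port of A: total sum once, then a fold XOR-ing (total_sum - value) + value.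
def pair_sum_xor_bitwise (arr : List Int) : Int :=
  let total_sum := arr.sum
  arr.foldl (fun result value => Int.xor result ((total_sum - value) + value)) 0

-- ===== PORT B =====
-- Port of B: closed form -- sum for odd length, 0 for even length.
def pair_sum_xor_bitwise_alt (arr : List Int) : Int :=
  if arr.length % 2 = 1 then arr.sum else 0

-- ===== PRECONDITION & SPEC =====
def Spec_pair_sum_xor_bitwise (arr : List Int) (out : Int) : Prop := out = pair_sum_xor_bitwise_alt arr
instance (arr : List Int) (out : Int) : Decidable (Spec_pair_sum_xor_bitwise arr out) := by unfold Spec_pair_sum_xor_bitwise; infer_instance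

-- ===== CLAIM (what is proved, stated in full; the proofs are below) =====
def Claim_equal_pair_sum_xor_bitwise : Prop := ∀ (arr : List Int), Dom_pair_sum_xor_bitwise arr → Spec_pair_sum_xor_bitwise arr (pair_sum_xor_bitwise arr)

-- ===== LEMMAS AND PROOFS =====

-- ===== VERDICT (by name: the statement is the Claim_ definition above) =====
theorem int_xor_xor_cancel (a t : Int) : Int.xor (Int.xor a t) t = a := by
  cases a <;> cases t <;> simp [Int.xor]

theorem int_xor_zero_left (t : Int) : Int.xor 0 t = t := by
  cases t <;> simp [Int.xor]

theorem foldl_xor_const (t : Int) (l : List Int) : ∀ (r : Int),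
    l.foldl (fun result value => Int.xor result ((t - value) + value)) r
      = if l.length % 2 = 1 then Int.xor r t else r := by
  induction l with
  | nil => intro r; simp
  | cons v l ih =>
    intro r
    rw [List.foldl_cons, Int.sub_add_cancel, ih (Int.xor r t)]
    rcases Nat.even_or_odd l.length with h | h
    · have h2 : l.length % 2 = 0 := Nat.even_iff.mp h
      have h3 : (l.length + 1) % 2 = 1 := by omega
      simp [h2, h3]
    · have h2 : l.length % 2 = 1 := Nat.odd_iff.mp h
      have h3 : (l.length + 1) % 2 = 0 := by omega
      simp [h2, h3, int_xor_xor_cancel]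

theorem pair_sum_xor_bitwise_spec : Claim_equal_pair_sum_xor_bitwise := by
  intro arr _
  unfold Spec_pair_sum_xor_bitwise pair_sum_xor_bitwise pair_sum_xor_bitwise_alt
  rw [foldl_xor_const]
  split <;> simp [int_xor_zero_left]
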